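-- pv_equiv track=rewrite | github.com/mayElimelech/hangman | unit7.py | arrow
-- ===== SOURCE A (Python) =====
-- def arrow(my_char, max_length):
--     arrow_str = ""
--     for i in range(1, max_length + 1):
--         line = my_char * i
--         arrow_str += line + "\n"
--     for i in range(max_length - 1, 0, -1):
--         line = my_char * i
--         arrow_str += line + "\n"
--     return arrow_str[:-1]
-- ===== SOURCE B (Python) =====
-- def arrow(my_char, max_length):
--     lines = [my_char * (max_length - abs(max_length - 1 - i))
--              for i in range(2 * max_length - 1)]
--     return "\n".join(lines)
-- ===== Notes on version B (the rewrite author's own statement) =====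
-- stated objective: simpler
-- what changed: Replaced A's two directional += loops with trailing-newline trim by a single comprehension over range(2*max_length-1) computing each line's width as max_length - abs(max_length-1-i), joined with '\n'.
import Mathlib
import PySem

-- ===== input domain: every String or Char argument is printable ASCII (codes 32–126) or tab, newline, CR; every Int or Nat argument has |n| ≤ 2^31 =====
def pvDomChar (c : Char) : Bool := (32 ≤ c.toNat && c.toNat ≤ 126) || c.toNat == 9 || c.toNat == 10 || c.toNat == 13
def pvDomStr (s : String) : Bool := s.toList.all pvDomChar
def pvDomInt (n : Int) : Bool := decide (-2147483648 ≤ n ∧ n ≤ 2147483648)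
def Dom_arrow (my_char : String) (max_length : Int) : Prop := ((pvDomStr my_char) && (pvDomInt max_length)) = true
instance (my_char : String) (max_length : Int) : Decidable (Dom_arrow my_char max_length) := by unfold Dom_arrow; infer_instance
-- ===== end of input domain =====

-- B replaces A's two directional accumulation loops by a single comprehension computing each
-- line's width as max_length - |max_length-1-i|, joined with '\n' (objective: simpler).

-- ===== PORT A =====
-- arrow_str accumulated as List Char; each iteration appends (my_char * i) ++ "\n"; finally [:-1].
def arrow (my_char : String) (max_length : Int) : String :=
  let cs := my_char.toList
  let s1 := (PySem.List.pyRange 1 (max_length + 1) 1).foldl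
    (fun acc i => acc ++ (PySem.List.pyRepeat cs i ++ ['\n'])) []
  let s2 := (PySem.List.pyRange (max_length - 1) 0 (-1)).foldl
    (fun acc i => acc ++ (PySem.List.pyRepeat cs i ++ ['\n'])) s1
  String.ofList (PySem.List.slice s2 none (some (-1)))

-- ===== PORT B =====
-- one comprehension over range(2*max_length-1), then "\n".join
def arrow_alt (my_char : String) (max_length : Int) : String :=
  let lines := (PySem.List.pyRange 0 (2 * max_length - 1) 1).map
    (fun i => PySem.List.pyRepeat my_char.toList (max_length - ((max_length - 1 - i).natAbs : Int)))
  String.ofList (PySem.Chars.join ['\n'] lines)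

-- ===== PRECONDITION & SPEC =====
def Spec_arrow (my_char : String) (max_length : Int) (out : String) : Prop := out = arrow_alt my_char max_length
instance (my_char : String) (max_length : Int) (out : String) : Decidable (Spec_arrow my_char max_length out) := by unfold Spec_arrow; infer_instance

-- ===== CLAIM (what is proved, stated in full; the proofs are below) =====
def Claim_equal_arrow : Prop := ∀ (my_char : String) (max_length : Int), Dom_arrow my_char max_length → Spec_arrow my_char max_length (arrow my_char max_length)

-- ===== LEMMAS AND PROOFS =====

-- dropping the final '\n' from the concatenation of newline-terminated lines is join
lemma dropLast_flat_lines (xs : List (List Char)) (hx : xs ≠ []) :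
    (xs.map (fun l => l ++ ['\n'])).flatten.dropLast = PySem.Chars.join ['\n'] xs := by
  induction xs with
  | nil => simp at hx
  | cons a t ih =>
    cases t with
    | nil => simp [PySem.Chars.join_singleton, List.dropLast_append_of_ne_nil]
    | cons b t' =>
      have h2 := ih (by simp)
      simp only [List.map_cons, List.flatten_cons] at h2 ⊢
      rw [List.dropLast_append_of_ne_nil (by simp), h2, PySem.Chars.join_cons_cons]

-- the single comprehension's lines are exactly A's ascending then descending lines
lemma lines_split (cs : List Char) (ml : Int) (h : 0 < ml) :
    (PySem.List.pyRange 0 (2 * ml - 1) 1).map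
      (fun i => PySem.List.pyRepeat cs (ml - ((ml - 1 - i).natAbs : Int)))
    = (PySem.List.pyRange 1 (ml + 1) 1).map (fun i => PySem.List.pyRepeat cs i)
      ++ (PySem.List.pyRange (ml - 1) 0 (-1)).map (fun i => PySem.List.pyRepeat cs i) := by
  rw [PySem.List.pyRange_one_append 0 ml (2 * ml - 1) (by omega) (by omega), List.map_append]
  congr 1
  · rw [PySem.List.pyRange_one 0 ml, PySem.List.pyRange_one 1 (ml + 1), List.map_map,
        List.map_map, show (ml - 0).toNat = (ml + 1 - 1).toNat by omega]
    refine List.map_congr_left (fun k hk => ?_)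
    have hk' : (k : Int) < ml := by
      have := List.mem_range.mp hk
      omega
    simp only [Function.comp]
    congr 1
    omega
  · rw [PySem.List.pyRange_one ml (2 * ml - 1), PySem.List.pyRange_neg_one (ml - 1) 0,
        List.map_map, List.map_map, show (2 * ml - 1 - ml).toNat = (ml - 1 - 0).toNat by omega]
    refine List.map_congr_left (fun k hk => ?_)
    simp only [Function.comp]
    congr 1
    omega

-- ===== VERDICT (by name: the statement is the Claim_ definition above) =====
theorem arrow_spec : Claim_equal_arrow := by
  intro my_char ml _
  unfold Spec_arrow arrow arrow_alt
  dsimp only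
  by_cases h : ml ≤ 0
  · rw [PySem.List.pyRange_one_eq_nil (by omega), PySem.List.pyRange_neg_one_eq_nil (by omega),
        PySem.List.pyRange_one_eq_nil (by omega)]
    simp [PySem.Chars.join_nil, PySem.List.slice_to_neg_one]
  · rw [not_le] at h
    rw [PySem.List.foldl_append_eq_flatMap, PySem.List.foldl_append_eq_flatMap,
        PySem.List.slice_to_neg_one, lines_split my_char.toList ml h]
    have hne : ((PySem.List.pyRange 1 (ml + 1) 1).map (fun i => PySem.List.pyRepeat my_char.toList i)
        ++ (PySem.List.pyRange (ml - 1) 0 (-1)).map (fun i => PySem.List.pyRepeat my_char.toList i)) ≠ [] := by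
      rw [PySem.List.pyRange_one_cons (by omega)]
      simp
    rw [← dropLast_flat_lines _ hne]
    simp [List.flatMap_def, Function.comp_def]
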